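-- pv_equiv track=rewrite | github.com/Aasthaengg/IBMdataset | Python_codes/p03488/s458581056.py | check
-- ===== SOURCE A (Python) =====
-- def check(goal, dist_data, start):
--     dp_now = [0 for i in range(17000)]
--     dp_now[start + 8500] = 1
--     dp_next = [0 for i in range(17000)]
--
--     for i in range(len(dist_data)):
--         for j in range(len(dp_now)):
--             if dp_now[j]:
--                 dp_next[j + dist_data[i]] = 1
--                 dp_next[j - dist_data[i]] = 1
--         dp_now = dp_next
--         dp_next = [0 for i in range(17000)]
--
--     return dp_now[goal + 8500]
-- ===== SOURCE B (Python) =====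
-- def check(goal, dist_data, start):
--     # Reduce the signed walk to subset sum: goal is reachable from start with
--     # steps +-d_i  iff  t = goal - start + S (S = sum of |d_i|) is even and
--     # t//2 is a subset sum of the absolute distances.
--     S = 0
--     sums = {0}
--     for d in dist_data:
--         a = abs(d)
--         S += a
--         sums = sums | {s + a for s in sums}
--     t = goal - start + S
--     if t % 2 == 0 and 0 <= t // 2 <= S and (t // 2) in sums:
--         return 1
--     return 0
-- ===== Notes on version B (the rewrite author's own statement) =====
-- stated objective: alternative
-- what changed: replaces the +-shift position DP over a 17000-slot list by a number-theoretic reduction to subset sum: goal is reachable iff t = goal-start+sum(|d|) is even, 0 <= t//2 <= sum(|d|), and t//2 is a subset sum of the absolute distances, computed with a growing set of subset sums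
-- outside the precondition, e.g. on check(8495, [5], -8500): A returns 1, B returns 0; on check(0, [9000], 0): A raises IndexError, B returns 0
import Mathlib
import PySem

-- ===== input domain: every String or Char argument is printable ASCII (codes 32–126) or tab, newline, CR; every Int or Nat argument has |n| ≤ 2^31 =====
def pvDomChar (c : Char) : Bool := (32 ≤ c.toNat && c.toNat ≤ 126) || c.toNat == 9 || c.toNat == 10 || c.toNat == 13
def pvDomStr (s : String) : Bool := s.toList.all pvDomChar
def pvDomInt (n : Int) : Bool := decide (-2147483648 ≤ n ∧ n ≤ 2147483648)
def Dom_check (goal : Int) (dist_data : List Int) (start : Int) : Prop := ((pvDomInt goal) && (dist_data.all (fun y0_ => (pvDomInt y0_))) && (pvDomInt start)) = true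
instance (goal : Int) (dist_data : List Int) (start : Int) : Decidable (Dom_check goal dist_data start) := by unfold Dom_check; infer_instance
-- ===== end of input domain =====

-- B replaces A's +-shift position DP over a 17000-slot list by a subset-sum
-- reduction: goal is reachable iff t = goal-start+sum(|d|) is even and t/2 is a
-- subset sum of the absolute distances (alternative algorithm, set of subset sums).


-- ===== PORT A =====
-- body of A's inner loop: if dp_now[j]: dp_next[j+d] = 1; dp_next[j-d] = 1
def innerBody (d : Int) (nx : List Int) (j v : Int) : List Int :=
  if v ≠ 0 then PySem.List.pySetD (PySem.List.pySetD nx (j + d) 1) (j - d) 1 else nx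

-- one pass of A's inner loop: for j in range(len(dp_now)): … — a single pass over
-- dp_now with the running index j as loop state (same order, same reads and writes)
def stepA (now : List Int) (d : Int) : List Int :=
  (now.foldl (fun p v => (innerBody d p.1 p.2 v, p.2 + 1))
    ((List.replicate 17000 0 : List Int), (0 : Int))).1

def check (goal : Int) (dist_data : List Int) (start : Int) : Int :=
  let dp0 : List Int := PySem.List.pySetD (List.replicate 17000 0) (start + 8500) 1
  PySem.List.pyGetD (dist_data.foldl stepA dp0) (goal + 8500) 0

-- ===== PORT B =====
-- one loop iteration of Source B: a = abs(d); S += a; sums = sums | {s + a for s in sums}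
def stepB (st : Int × PySem.Set Int) (d : Int) : Int × PySem.Set Int :=
  let a := |d|
  (st.1 + a, PySem.Set.union st.2 (st.2.map (fun s => s + a)))

def check_alt (goal : Int) (dist_data : List Int) (start : Int) : Int :=
  let st := dist_data.foldl stepB ((0 : Int), PySem.Set.ofList [(0 : Int)])
  let t := goal - start + st.1
  if PySem.Int.mod t 2 = 0 ∧ 0 ≤ PySem.Int.floordiv t 2 ∧
      PySem.Int.floordiv t 2 ≤ st.1 ∧
      PySem.Set.contains st.2 (PySem.Int.floordiv t 2) = true
  then 1 else 0

-- ===== PRECONDITION & SPEC =====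
-- Pre_ excludes inputs where start+8500, goal+8500 or some reachable index j±d leaves
-- [0,17000): there A raises IndexError or silently wraps a negative index to the top
-- of the array (an artefact of Python list indexing), and B differs or is undefined.
def Pre_check (goal : Int) (dist_data : List Int) (start : Int) : Prop :=
  0 ≤ start + 8500 - (dist_data.map (fun x => |x|)).sum ∧
  start + 8500 + (dist_data.map (fun x => |x|)).sum < 17000 ∧
  0 ≤ goal + 8500 ∧ goal + 8500 < 17000
instance (goal : Int) (dist_data : List Int) (start : Int) : Decidable (Pre_check goal dist_data start) := by unfold Pre_check; infer_instance
def pvWitness_check : Int × List Int × Int := (0, [5], 0)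

def Spec_check (goal : Int) (dist_data : List Int) (start : Int) (out : Int) : Prop := out = check_alt goal dist_data start
instance (goal : Int) (dist_data : List Int) (start : Int) (out : Int) : Decidable (Spec_check goal dist_data start out) := by unfold Spec_check; infer_instance

-- ===== CLAIM (what is proved, stated in full; the proofs are below) =====
def Claim_equal_check : Prop := ∀ (goal : Int) (dist_data : List Int) (start : Int), Dom_check goal dist_data start → Pre_check goal dist_data start → Spec_check goal dist_data start (check goal dist_data start)

-- ===== LEMMAS AND PROOFS =====
set_option maxRecDepth 4096

-- the joint invariant: cell k of A's array is 1 exactly when position k is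
-- base + 2*σ - S for some subset sum σ currently in B's set, and every subset
-- sum lies in [0, S]
def InvAB (now : List Int) (S : Int) (sums : List Int) (base : Int) : Prop :=
  now.length = 17000 ∧ 0 ≤ S ∧
  (∀ σ ∈ sums, 0 ≤ σ ∧ σ ≤ S) ∧
  (∀ k : Nat, k < 17000 →
    now.getD k 0 = if ∃ σ ∈ sums, (k : Int) = base + 2 * σ - S then 1 else 0)

theorem foldl_counter (g : List Int → Int → Int → List Int) :
    ∀ (vs : List Int) (s : Int) (acc : List Int),
      (vs.foldl (fun p v => (g p.1 p.2 v, p.2 + 1)) (acc, s)).1 =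
      (PySem.List.enumerate vs s).foldl (fun x jv => g x jv.1 jv.2) acc
  | [], _, _ => rfl
  | v :: vs, s, acc => by
      rw [List.foldl_cons, PySem.List.enumerate_cons, List.foldl_cons]
      exact foldl_counter g vs (s + 1) (g acc s v)

theorem stepA_eq (now : List Int) (d : Int) (hlen : now.length = 17000) :
    stepA now d = (PySem.List.pyRange 0 17000 1).foldl
      (fun nx j =>
        if PySem.List.pyGetD now j 0 ≠ 0 then
          PySem.List.pySetD (PySem.List.pySetD nx (j + d) 1) (j - d) 1
        else nx)
      (List.replicate 17000 0) := by
  unfold stepA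
  rw [foldl_counter (innerBody d) now 0 (List.replicate 17000 0),
    PySem.List.enumerate_eq_map_pyRange (d := 0), List.foldl_map,
    show PySem.List.len now = (17000 : Int) by simp [hlen]]
  simp only [innerBody]

theorem getD_set' (xs : List Int) (i k : Nat) (v : Int) (hi : i < xs.length) :
    (xs.set i v).getD k 0 = if k = i then v else xs.getD k 0 := by
  rw [List.getD_eq_getElem?_getD, List.getElem?_set, List.getD_eq_getElem?_getD]
  by_cases h : i = k
  · subst h; rw [if_pos rfl, if_pos rfl, if_pos hi]; rfl
  · rw [if_neg h, if_neg (by omega : ¬ k = i)]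

theorem inner_fold_char (d : Int) (now : List Int) (js : List Int) (nx : List Int)
    (hlen : nx.length = 17000)
    (hb : ∀ j ∈ js, PySem.List.pyGetD now j 0 ≠ 0 →
        0 ≤ j + d ∧ j + d < 17000 ∧ 0 ≤ j - d ∧ j - d < 17000) :
    (js.foldl
      (fun nx j =>
        if PySem.List.pyGetD now j 0 ≠ 0 then
          PySem.List.pySetD (PySem.List.pySetD nx (j + d) 1) (j - d) 1
        else nx) nx).length = 17000 ∧
    ∀ k : Nat, k < 17000 →
      (js.foldl
        (fun nx j =>
          if PySem.List.pyGetD now j 0 ≠ 0 then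
            PySem.List.pySetD (PySem.List.pySetD nx (j + d) 1) (j - d) 1
          else nx) nx).getD k 0 =
        if (∃ j ∈ js, PySem.List.pyGetD now j 0 ≠ 0 ∧ ((k : Int) = j + d ∨ (k : Int) = j - d))
        then 1 else nx.getD k 0 := by
  induction js generalizing nx with
  | nil => exact ⟨hlen, by simp⟩
  | cons j js ih =>
    simp only [List.foldl_cons]
    by_cases hj : PySem.List.pyGetD now j 0 ≠ 0
    · rw [if_pos hj]
      obtain ⟨h1, h2, h3, h4⟩ := hb j (List.mem_cons_self ..) hj
      have e1 : PySem.List.pySetD nx (j + d) 1 = nx.set (j + d).toNat 1 :=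
        PySem.List.pySetD_of_nonneg nx 1 h1
      have e2 : PySem.List.pySetD (nx.set (j + d).toNat 1) (j - d) 1 =
          (nx.set (j + d).toNat 1).set (j - d).toNat 1 :=
        PySem.List.pySetD_of_nonneg _ 1 h3
      rw [e1, e2]
      have hlen' : ((nx.set (j + d).toNat 1).set (j - d).toNat 1).length = 17000 := by
        simp [hlen]
      obtain ⟨hL, hG⟩ := ih _ hlen' (fun x hx => hb x (List.mem_cons_of_mem _ hx))
      refine ⟨hL, fun k hk => ?_⟩
      rw [hG k hk]
      have hset : ((nx.set (j + d).toNat 1).set (j - d).toNat 1).getD k 0 =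
          if (k : Int) = j + d ∨ (k : Int) = j - d then 1 else nx.getD k 0 := by
        rw [getD_set' _ _ _ _ (by simp [hlen]; omega), getD_set' _ _ _ _ (by rw [hlen]; omega)]
        split_ifs <;> first | rfl | omega
      have hlift : (∃ x ∈ js, PySem.List.pyGetD now x 0 ≠ 0 ∧
          ((k : Int) = x + d ∨ (k : Int) = x - d)) →
          (∃ x ∈ j :: js, PySem.List.pyGetD now x 0 ≠ 0 ∧
          ((k : Int) = x + d ∨ (k : Int) = x - d)) :=
        fun ⟨x, hx, hc⟩ => ⟨x, List.mem_cons_of_mem _ hx, hc⟩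
      by_cases hex : ∃ x ∈ js, PySem.List.pyGetD now x 0 ≠ 0 ∧
          ((k : Int) = x + d ∨ (k : Int) = x - d)
      · rw [if_pos hex, if_pos (hlift hex)]
      · rw [if_neg hex, hset]
        by_cases hc : (k : Int) = j + d ∨ (k : Int) = j - d
        · rw [if_pos hc, if_pos ⟨j, List.mem_cons_self .., hj, hc⟩]
        · rw [if_neg hc, if_neg (by
            rintro ⟨x, hx, hne, hcc⟩
            rcases List.mem_cons.1 hx with rfl | hx
            · exact hc hcc
            · exact hex ⟨x, hx, hne, hcc⟩)]
    · rw [if_neg hj]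
      obtain ⟨hL, hG⟩ := ih nx hlen (fun x hx => hb x (List.mem_cons_of_mem _ hx))
      refine ⟨hL, fun k hk => ?_⟩
      rw [hG k hk]
      have hlift : (∃ x ∈ js, PySem.List.pyGetD now x 0 ≠ 0 ∧
          ((k : Int) = x + d ∨ (k : Int) = x - d)) →
          (∃ x ∈ j :: js, PySem.List.pyGetD now x 0 ≠ 0 ∧
          ((k : Int) = x + d ∨ (k : Int) = x - d)) :=
        fun ⟨x, hx, hc⟩ => ⟨x, List.mem_cons_of_mem _ hx, hc⟩
      by_cases hex : ∃ x ∈ js, PySem.List.pyGetD now x 0 ≠ 0 ∧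
          ((k : Int) = x + d ∨ (k : Int) = x - d)
      · rw [if_pos hex, if_pos (hlift hex)]
      · rw [if_neg hex, if_neg (by
          rintro ⟨x, hx, hne, hcc⟩
          rcases List.mem_cons.1 hx with rfl | hx
          · exact hj hne
          · exact hex ⟨x, hx, hne, hcc⟩)]

theorem step_preserves (now : List Int) (S : Int) (sums : List Int) (base d : Int)
    (h : InvAB now S sums base)
    (hlo : 0 ≤ base - (S + |d|)) (hhi : base + (S + |d|) < 17000) :
    InvAB (stepA now d) (S + |d|)
      (PySem.Set.union sums (sums.map (fun s => s + |d|))) base := by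
  obtain ⟨hlen, hS, hbnd, hsup⟩ := h
  have ha : 0 ≤ |d| := abs_nonneg d
  -- nonzero array cell ↔ matching subset sum, for an Int index in range
  have hcell' : ∀ j : Int, 0 ≤ j → j < 17000 →
      (PySem.List.pyGetD now j 0 ≠ 0 ↔ ∃ σ ∈ sums, j = base + 2 * σ - S) := by
    intro j hj0 hj1
    have he : j = ((j.toNat : Nat) : Int) := by omega
    have hjj : ((j.toNat : Nat) : Int) = j := he.symm
    rw [he, PySem.List.pyGetD_natCast, hsup _ (by omega)]
    simp only [hjj]
    split_ifs with hb <;> simp [hb]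
  have hmem : ∀ x : Int, x ∈ PySem.Set.union sums (sums.map (fun s => s + |d|)) ↔
      x ∈ sums ∨ ∃ σ ∈ sums, x = σ + |d| := by
    intro x
    rw [PySem.Set.mem_union, List.mem_map]
    constructor
    · rintro (h | ⟨σ, hσ, he⟩)
      · exact Or.inl h
      · exact Or.inr ⟨σ, hσ, he.symm⟩
    · rintro (h | ⟨σ, hσ, he⟩)
      · exact Or.inl h
      · exact Or.inr ⟨σ, hσ, he.symm⟩
  have hb : ∀ j ∈ PySem.List.pyRange 0 17000 1, PySem.List.pyGetD now j 0 ≠ 0 →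
      0 ≤ j + d ∧ j + d < 17000 ∧ 0 ≤ j - d ∧ j - d < 17000 := by
    intro j hjmem hjne
    have hr := (PySem.List.mem_pyRange_one).1 hjmem
    obtain ⟨σ, hσ, hje⟩ := (hcell' j hr.1 hr.2).1 hjne
    have := hbnd σ hσ
    rcases abs_choice d with hd | hd <;> omega
  obtain ⟨hL, hG⟩ := inner_fold_char d now (PySem.List.pyRange 0 17000 1)
    (List.replicate 17000 0) List.length_replicate hb
  have hiff : ∀ k : Nat, k < 17000 →
      ((∃ j ∈ PySem.List.pyRange 0 17000 1, PySem.List.pyGetD now j 0 ≠ 0 ∧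
          ((k : Int) = j + d ∨ (k : Int) = j - d)) ↔
        (∃ σ' ∈ PySem.Set.union sums (sums.map (fun s => s + |d|)),
          (k : Int) = base + 2 * σ' - (S + |d|))) := by
    intro k hk
    constructor
    · rintro ⟨j, hjmem, hjne, hc⟩
      have hr := (PySem.List.mem_pyRange_one).1 hjmem
      obtain ⟨σ, hσ, hje⟩ := (hcell' j hr.1 hr.2).1 hjne
      have hσb := hbnd σ hσ
      have hca : (k : Int) = j + |d| ∨ (k : Int) = j - |d| := by
        rcases abs_choice d with hd | hd <;> omega
      rcases hca with hca | hca
      · exact ⟨σ + |d|, (hmem _).2 (Or.inr ⟨σ, hσ, rfl⟩), by omega⟩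
      · exact ⟨σ, (hmem _).2 (Or.inl hσ), by omega⟩
    · rintro ⟨σ', hσ'mem, hke⟩
      rcases (hmem σ').1 hσ'mem with hs | ⟨σ, hσ, rfl⟩
      · have hσb := hbnd σ' hs
        refine ⟨base + 2 * σ' - S, (PySem.List.mem_pyRange_one).2 (by omega), ?_, ?_⟩
        · exact (hcell' _ (by omega) (by omega)).2 ⟨σ', hs, rfl⟩
        · rcases abs_choice d with hd | hd <;> omega
      · have hσb := hbnd σ hσ
        refine ⟨base + 2 * σ - S, (PySem.List.mem_pyRange_one).2 (by omega), ?_, ?_⟩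
        · exact (hcell' _ (by omega) (by omega)).2 ⟨σ, hσ, rfl⟩
        · rcases abs_choice d with hd | hd <;> omega
  refine ⟨by rw [stepA_eq now d hlen]; exact hL, by omega, ?_, ?_⟩
  · intro σ' hσ'
    rcases (hmem σ').1 hσ' with hs | ⟨σ, hσ, rfl⟩
    · have := hbnd σ' hs; omega
    · have := hbnd σ hσ; omega
  · intro k hk
    show (stepA now d).getD k 0 = _
    rw [stepA_eq now d hlen, hG k hk]
    have hrep : (List.replicate 17000 (0 : Int)).getD k 0 = 0 := by
      rw [List.getD_eq_getElem?_getD, List.getElem?_replicate, if_pos hk]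
      rfl
    rw [hrep]
    exact if_congr (hiff k hk) rfl rfl

theorem fold_preserves (ds : List Int) (now : List Int) (S : Int) (sums : List Int)
    (base : Int) (h : InvAB now S sums base)
    (hlo : 0 ≤ base - (S + (ds.map (fun x => |x|)).sum))
    (hhi : base + (S + (ds.map (fun x => |x|)).sum) < 17000) :
    InvAB (ds.foldl stepA now) (ds.foldl stepB (S, sums)).1
      (ds.foldl stepB (S, sums)).2 base := by
  induction ds generalizing now S sums with
  | nil => simpa using h
  | cons d ds ih =>
    simp only [List.foldl_cons, List.map_cons, List.sum_cons] at *
    have hSr : 0 ≤ (ds.map (fun x => |x|)).sum :=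
      List.sum_nonneg (fun x hx => by
        obtain ⟨y, _, rfl⟩ := List.mem_map.1 hx; exact abs_nonneg y)
    have habs : 0 ≤ |d| := abs_nonneg d
    have hstep := step_preserves now S sums base d h (by omega) (by omega)
    have hB : stepB (S, sums) d =
        (S + |d|, PySem.Set.union sums (sums.map (fun s => s + |d|))) := rfl
    rw [hB]
    exact ih _ _ _ hstep (by omega) (by omega)

-- ===== VERDICT (by name: the statement is the Claim_ definition above) =====
theorem check_spec : Claim_equal_check := by
  intro goal dist_data start _ hpre
  obtain ⟨hp1, hp2, hp3, hp4⟩ := hpre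
  have hSnn : 0 ≤ (dist_data.map (fun x => |x|)).sum :=
    List.sum_nonneg (fun x hx => by
      obtain ⟨y, _, rfl⟩ := List.mem_map.1 hx; exact abs_nonneg y)
  show check goal dist_data start = check_alt goal dist_data start
  simp only [check, check_alt]
  have hinit : InvAB (PySem.List.pySetD (List.replicate 17000 0) (start + 8500) 1)
      0 (PySem.Set.ofList [(0 : Int)]) (start + 8500) := by
    rw [PySem.List.pySetD_of_nonneg _ _ (by omega)]
    refine ⟨by rw [List.length_set, List.length_replicate], le_refl 0, ?_, ?_⟩
    · intro σ hσ
      have : σ = 0 := by simpa [PySem.Set.ofList] using hσ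
      omega
    · intro k hk
      have hone : PySem.Set.ofList [(0 : Int)] = [0] := rfl
      rw [getD_set' _ _ _ _ (by rw [List.length_replicate]; omega), hone]
      have hrep : (List.replicate 17000 (0 : Int)).getD k 0 = 0 := by
        rw [List.getD_eq_getElem?_getD, List.getElem?_replicate, if_pos hk]
        rfl
      rw [hrep]
      refine if_congr ?_ rfl rfl
      constructor
      · intro he
        exact ⟨0, List.mem_singleton_self 0, by omega⟩
      · rintro ⟨σ, hσ, he⟩
        have : σ = 0 := List.mem_singleton.1 hσ
        omega
  have hfin := fold_preserves dist_data _ 0 _ (start + 8500) hinit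
    (by omega) (by omega)
  obtain ⟨hL, hS, hbnd, hG⟩ := hfin
  have hg : goal + 8500 = (((goal + 8500).toNat : Nat) : Int) := by omega
  conv_lhs => rw [hg]
  rw [PySem.List.pyGetD_natCast, hG (goal + 8500).toNat (by omega)]
  rw [PySem.Int.mod_eq_emod_of_pos (by norm_num), PySem.Int.floordiv_eq_ediv_of_pos (by norm_num)]
  refine if_congr ?_ rfl rfl
  set SF := (dist_data.foldl stepB (0, PySem.Set.ofList [(0 : Int)])).1 with hSF
  set sumsF := (dist_data.foldl stepB (0, PySem.Set.ofList [(0 : Int)])).2 with hsumsF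
  constructor
  · rintro ⟨σ, hσ, he⟩
    have hσb := hbnd σ hσ
    have ht : goal - start + SF = 2 * σ := by omega
    refine ⟨by omega, by omega, by omega, ?_⟩
    rw [PySem.Set.contains_iff]
    have : (goal - start + SF) / 2 = σ := by omega
    rwa [this]
  · rintro ⟨h1, h2, h3, h4⟩
    have hm := (PySem.Set.contains_iff _ _).1 h4
    refine ⟨(goal - start + SF) / 2, hm, by omega⟩
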